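-- pv_equiv track=rewrite | github.com/joel10195/coding_test | 프로그래머스/1/12954. x만큼 간격이 있는 n개의 숫자/x만큼 간격이 있는 n개의 숫자.py | solution
-- ===== SOURCE A (Python) =====
-- def solution(x, n):
--     answer = []
--     #end = (n*x+1) if x > 0 else n+1 if x == 0 else (n*x-1)
--     #end = (n*x+1) if x > 0 else (n*x-1)
--     #for i in range(x, end, x):
--         #answer.append(i)
--     #return answer
--
--
--     if x > 0:
--         for i in range(x, n*x+1, x):
--             answer.append(i)
--         return answer
--     elif x == 0:
--         for i in range(n):
--             answer.append(x)
--         return answer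
--     else:
--         for i in range(x, n*x-1, x):
--             answer.append(i)
--         return answer
-- ===== SOURCE B (Python) =====
-- def solution(x, n):
--     return [x * (i + 1) for i in range(n)]
-- ===== Notes on version B (the rewrite author's own statement) =====
-- stated objective: simpler
-- what changed: Replaces A's three-way sign-cased range-stepping with appends by a single comprehension computing each element directly as x*(i+1).
import Mathlib
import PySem

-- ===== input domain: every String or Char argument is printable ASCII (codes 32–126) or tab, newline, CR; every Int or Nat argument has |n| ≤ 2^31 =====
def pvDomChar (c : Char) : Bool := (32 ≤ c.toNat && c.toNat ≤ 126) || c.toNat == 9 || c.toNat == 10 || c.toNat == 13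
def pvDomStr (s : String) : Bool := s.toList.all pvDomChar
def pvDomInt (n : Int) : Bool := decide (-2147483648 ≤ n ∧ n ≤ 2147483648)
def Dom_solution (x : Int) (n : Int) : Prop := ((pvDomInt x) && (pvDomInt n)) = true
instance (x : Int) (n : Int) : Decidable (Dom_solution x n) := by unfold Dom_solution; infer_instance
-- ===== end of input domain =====

-- B replaces A's three sign-cased range-stepping loops with one comprehension computing each element as x*(i+1); simpler.


-- ===== PORT A =====
def solution (x : Int) (n : Int) : List Int :=
  if x > 0 then
    (PySem.List.pyRange x (n * x + 1) x).foldl (fun acc i => acc ++ [i]) []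
  else if x = 0 then
    (PySem.List.pyRange 0 n 1).foldl (fun acc _ => acc ++ [x]) []
  else
    (PySem.List.pyRange x (n * x - 1) x).foldl (fun acc i => acc ++ [i]) []

-- ===== PORT B =====
def solution_alt (x : Int) (n : Int) : List Int :=
  (PySem.List.pyRange 0 n 1).map (fun i => x * (i + 1))

-- ===== PRECONDITION & SPEC =====
def Spec_solution (x : Int) (n : Int) (out : List Int) : Prop := out = solution_alt x n
instance (x : Int) (n : Int) (out : List Int) : Decidable (Spec_solution x n out) := by unfold Spec_solution; infer_instance

-- ===== CLAIM (what is proved, stated in full; the proofs are below) =====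
def Claim_equal_solution : Prop := ∀ (x : Int) (n : Int), Dom_solution x n → Spec_solution x n (solution x n)

-- ===== LEMMAS AND PROOFS =====
lemma len_pos (x n : Int) (hx : 0 < x) :
    (if x < n * x + 1 then ((n * x + 1 - x + x - 1) / x).toNat else 0) = n.toNat := by
  by_cases hn : 1 ≤ n
  · have h : x < n * x + 1 := by nlinarith
    rw [if_pos h]
    have he : n * x + 1 - x + x - 1 = n * x := by ring
    rw [he, Int.mul_ediv_cancel _ (ne_of_gt hx)]
  · have hn' : n ≤ 0 := by omega
    have h : ¬ x < n * x + 1 := by simp only [not_lt]; nlinarith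
    rw [if_neg h]
    omega

lemma len_neg (x n : Int) (hx : x < 0) :
    (if n * x - 1 < x then ((x - (n * x - 1) + -x - 1) / -x).toNat else 0) = n.toNat := by
  by_cases hn : 1 ≤ n
  · have h : n * x - 1 < x := by nlinarith
    rw [if_pos h]
    have he : x - (n * x - 1) + -x - 1 = n * -x := by ring
    rw [he, Int.mul_ediv_cancel _ (by omega : -x ≠ 0)]
  · have hn' : n ≤ 0 := by omega
    have h : ¬ n * x - 1 < x := by simp only [not_lt]; nlinarith
    rw [if_neg h]
    omega

lemma alt_eq (x n : Int) :
    solution_alt x n = (List.range n.toNat).map (fun (k : Nat) => x * ((k : Int) + 1)) := by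
  unfold solution_alt
  rw [PySem.List.pyRange_one, List.map_map]
  simp only [sub_zero]
  apply List.map_congr_left
  intro k _
  simp

-- ===== VERDICT (by name: the statement is the Claim_ definition above) =====
theorem solution_spec : Claim_equal_solution := by
  intro x n _
  unfold Spec_solution solution
  split_ifs with h1 h2
  · rw [PySem.List.foldl_append_singleton, PySem.List.pyRange_of_pos _ _ h1,
      List.nil_append, len_pos x n h1, alt_eq]
    apply List.map_congr_left
    intro k _
    ring
  · rw [PySem.List.foldl_append_singleton_eq_map (fun _ => x), List.nil_append, alt_eq, h2,
      PySem.List.pyRange_one, List.map_map]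
    simp only [sub_zero]
    apply List.map_congr_left
    intro k _
    simp
  · have hx : x < 0 := by omega
    rw [PySem.List.foldl_append_singleton, PySem.List.pyRange_of_neg _ _ hx,
      List.nil_append, len_neg x n hx, alt_eq]
    apply List.map_congr_left
    intro k _
    ring
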